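-- pv_equiv track=rewrite | github.com/PurthaShaariyaar/OA | numPlayers.py | numPlayers
-- ===== SOURCE A (Python) =====
-- def numPlayers(k, scores):
--     # Filter out players with a score of 0
--     filtered_scores = [score for score in scores if score > 0]
--
--     # Sort the scores in descending order
--     sorted_scores = sorted(filtered_scores, reverse=True)
--
--     # Initialize the count of players who can level up
--     can_level_up = 0
--
--     # Iterate through the sorted scores and count how many players can level up
--     for i, score in enumerate(sorted_scores):
--         # The rank of the current player is i + 1 (due to zero-based indexing)
--         # If the rank is within the cutoff, increase the count
--         if i < k or sorted_scores[i] == sorted_scores[k-1]: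
--             can_level_up += 1
--         else:
--             break  # No need to check further if rank is beyond cutoff
--
--     return can_level_up
-- ===== SOURCE B (Python) =====
-- def _kth(xs, k):
--     # k-th largest (1-based) of xs by iterative quickselect (middle pivot);
--     # requires 1 <= k <= len(xs)
--     while True:
--         p = xs[len(xs) // 2]
--         gt = [x for x in xs if x > p]
--         if k <= len(gt):
--             xs = gt
--             continue
--         lt = [x for x in xs if x < p]
--         if k <= len(xs) - len(lt):
--             return p
--         k -= len(xs) - len(lt)
--         xs = lt
--
--
-- def numPlayers(k, scores):
--     pos = [s for s in scores if s > 0]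
--     if k <= 0:
--         return 0
--     if len(pos) <= k:
--         return len(pos)
--     t = _kth(pos, k)
--     return sum(1 for s in pos if s >= t)
-- ===== Notes on version B (the rewrite author's own statement) =====
-- stated objective: alternative
-- what changed: B replaces A's full descending sort plus tie-extending scan by a quickselect for the k-th largest positive score followed by one counting pass of elements >= it, with direct answers for k <= 0 and k >= number of positive scores.
-- intended difference: For k <= 0 with a nonempty positive list long enough that sorted_scores[k-1] wraps to an all-maximal prefix, A returns the count of the maximal score (an accident of Python negative indexing); B returns 0, the intended answer when the cutoff admits no rank. — e.g. on numPlayers(0, [5, 5]): A returns 2, B returns 0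
import Mathlib
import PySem

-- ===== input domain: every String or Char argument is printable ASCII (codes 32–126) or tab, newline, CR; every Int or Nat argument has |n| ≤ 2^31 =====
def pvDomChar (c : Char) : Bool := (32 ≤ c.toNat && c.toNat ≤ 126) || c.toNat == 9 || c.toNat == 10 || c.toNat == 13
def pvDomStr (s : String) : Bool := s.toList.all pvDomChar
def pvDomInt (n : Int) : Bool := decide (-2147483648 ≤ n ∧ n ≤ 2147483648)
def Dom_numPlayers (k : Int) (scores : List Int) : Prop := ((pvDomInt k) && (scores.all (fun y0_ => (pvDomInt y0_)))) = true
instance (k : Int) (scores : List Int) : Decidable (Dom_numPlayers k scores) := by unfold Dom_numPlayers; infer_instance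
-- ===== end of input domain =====

-- ===== PORT A =====
-- B replaces A's sort+scan by quickselect + one counting pass; A = B proved outside D_ (k <= 0 wraparound corner).
-- A's loop over enumerate(sorted_scores) with break; t? models sorted_scores[k-1]
-- (none = IndexError, excluded by Pre_; it is unused whenever Python never evaluates the subscript).
def numPlayersGo (k : Int) (t? : Option Int) (i : Nat) (rest : List Int) (acc : Int) : Int :=
  match rest with
  | [] => acc
  | x :: xs =>
    if (i : Int) < k then numPlayersGo k t? (i + 1) xs (acc + 1)
    else
      match t? with
      | some t => if x = t then numPlayersGo k t? (i + 1) xs (acc + 1) else acc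
      | none => acc

def numPlayers (k : Int) (scores : List Int) : Int :=
  let filteredScores := scores.filter (fun s => decide (0 < s))
  let sortedScores := PySem.List.sorted filteredScores (fun x => x) true
  numPlayersGo k (PySem.List.pyGet? sortedScores (k - 1)) 0 sortedScores 0

-- ===== PORT B =====
-- iterative quickselect with middle pivot, ported as the obvious tail recursion;
-- the [] => 0 case is a totality guard (unreached: B only calls it with 1 <= k <= len)
def kthLargest (xs : List Int) (k : Int) : Int :=
  if hx : xs = [] then 0  -- hx feeds the termination proof
  else
    let p := xs.getD (xs.length / 2) 0
    let gt := xs.filter (fun x => decide (p < x))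
    if k ≤ (gt.length : Int) then kthLargest gt k
    else
      let lt := xs.filter (fun x => decide (x < p))
      if k ≤ (xs.length : Int) - (lt.length : Int) then p
      else kthLargest lt (k - ((xs.length : Int) - (lt.length : Int)))
termination_by xs.length
decreasing_by
  all_goals
    have hm : xs.getD (xs.length / 2) 0 ∈ xs := by
      rw [List.getD_eq_getElem xs 0 (Nat.div_lt_self (List.length_pos_of_ne_nil hx) (by omega))]
      exact List.getElem_mem _
  all_goals
    simp only [List.length_unattach]
    conv_rhs => rw [← List.length_attach (l := xs)]
    apply List.length_filter_lt_length_iff_exists.mpr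
    exact ⟨⟨_, hm⟩, List.mem_attach _ _, by simp⟩
def numPlayers_alt (k : Int) (scores : List Int) : Int :=
  let pos := scores.filter (fun s => decide (0 < s))
  if k ≤ 0 then 0
  else if (pos.length : Int) ≤ k then (pos.length : Int)
  else
    let t := kthLargest pos k
    (pos.countP (fun s => decide (t ≤ s)) : Int)

-- ===== PRECONDITION & SPEC =====
-- Pre_ excludes exactly the inputs where A raises IndexError: k <= 0 with a nonempty positive list
-- shorter than 1-k, where sorted_scores[k-1] is out of range even after Python's negative-index wrap.
def Pre_numPlayers (k : Int) (scores : List Int) : Prop :=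
  1 ≤ k ∨ scores.filter (fun s => decide (0 < s)) = [] ∨
    1 - k ≤ ((scores.filter (fun s => decide (0 < s))).length : Int)
instance (k : Int) (scores : List Int) : Decidable (Pre_numPlayers k scores) := by
  unfold Pre_numPlayers; infer_instance
def pvWitness_numPlayers : Int × List Int := (1, [3])

-- For k <= 0 with a nonempty positive list long enough that sorted_scores[k-1] wraps to an all-maximal
-- prefix, A returns the count of the maximal score (an accident of Python negative indexing); B returns 0,
-- the intended answer when the cutoff admits no rank.
def D_numPlayers (k : Int) (scores : List Int) : Prop :=
  k ≤ 0 ∧ 1 - k ≤ scores.foldr (fun x n => if 0 < x then n + 1 else n) (0 : Int) ∧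
    scores.foldr (fun x n => if 0 < x then n + 1 else n) (0 : Int) + k - 1
      < (scores.count (scores.foldl max 0) : Int)
instance (k : Int) (scores : List Int) : Decidable (D_numPlayers k scores) := by
  unfold D_numPlayers; infer_instance

def Spec_numPlayers (k : Int) (scores : List Int) (out : Int) : Prop :=
  ¬ D_numPlayers k scores → out = numPlayers_alt k scores
instance (k : Int) (scores : List Int) (out : Int) : Decidable (Spec_numPlayers k scores out) := by
  unfold Spec_numPlayers; infer_instance

def pvDiffWitness_numPlayers : Int × List Int := (0, [5, 5])
def pvDiffWitnessOut_numPlayers : Int × Int := (2, 0)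

-- ===== CLAIM (what is proved, stated in full; the proofs are below) =====
def Claim_unchanged_numPlayers : Prop := ∀ (k : Int) (scores : List Int), Dom_numPlayers k scores → Pre_numPlayers k scores → Spec_numPlayers k scores (numPlayers k scores)
def Claim_changed_numPlayers : Prop := Dom_numPlayers (pvDiffWitness_numPlayers.1) (pvDiffWitness_numPlayers.2) ∧ Pre_numPlayers (pvDiffWitness_numPlayers.1) (pvDiffWitness_numPlayers.2) ∧ D_numPlayers (pvDiffWitness_numPlayers.1) (pvDiffWitness_numPlayers.2) ∧ numPlayers (pvDiffWitness_numPlayers.1) (pvDiffWitness_numPlayers.2) = pvDiffWitnessOut_numPlayers.1 ∧ numPlayers_alt (pvDiffWitness_numPlayers.1) (pvDiffWitness_numPlayers.2) = pvDiffWitnessOut_numPlayers.2 ∧ pvDiffWitnessOut_numPlayers.1 ≠ pvDiffWitnessOut_numPlayers.2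
def Claim_exact_numPlayers : Prop := ∀ (k : Int) (scores : List Int), Dom_numPlayers k scores → Pre_numPlayers k scores → D_numPlayers k scores → numPlayers k scores ≠ numPlayers_alt k scores

-- ===== LEMMAS AND PROOFS =====

lemma desc_le_index_iff (s : List Int) (hs : s.Pairwise (fun a b => b ≤ a)) (t : Int) :
    ∀ (j : Nat) (hj : j < s.length), (t ≤ s[j] ↔ j < s.countP (fun x => decide (t ≤ x))) := by
  induction s with
  | nil => intro j hj; simp at hj
  | cons a s' ih =>
    rcases List.pairwise_cons.mp hs with ⟨ha, hp⟩
    intro j hj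
    cases j with
    | zero =>
      simp only [List.getElem_cons_zero, List.countP_cons]
      by_cases h : t ≤ a
      · exact iff_of_true h (by simp [h])
      · have h0 : s'.countP (fun x => decide (t ≤ x)) = 0 := by
          apply List.countP_eq_zero.mpr; intro x hx
          have := ha x hx; simp; omega
        exact iff_of_false h (by simp [h, h0])
    | succ j =>
      have hj' : j < s'.length := by simpa using hj
      have hiff := ih hp j hj'
      simp only [List.getElem_cons_succ, List.countP_cons]
      by_cases h : t ≤ a
      · simp only [h, decide_true, if_pos]
        constructor
        · intro h2; have := hiff.mp h2; omega
        · intro h2; apply hiff.mpr; omega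
      · have h0 : s'.countP (fun x => decide (t ≤ x)) = 0 := by
          apply List.countP_eq_zero.mpr; intro x hx
          have := ha x hx; simp; omega
        have hle : s'[j] ≤ a := ha _ (List.getElem_mem hj')
        exact iff_of_false (by omega) (by simp [h, h0])

lemma desc_countP_lt_le (s : List Int) (hs : s.Pairwise (fun a b => b ≤ a)) (t : Int) :
    ∀ (j : Nat) (hj : j < s.length), s[j] ≤ t → s.countP (fun x => decide (t < x)) ≤ j := by
  induction s with
  | nil => intro j hj; simp at hj
  | cons a s' ih =>
    rcases List.pairwise_cons.mp hs with ⟨ha, hp⟩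
    intro j hj hx
    cases j with
    | zero =>
      simp only [List.getElem_cons_zero] at hx
      simp only [List.countP_cons]
      have h0 : s'.countP (fun x => decide (t < x)) = 0 := by
        apply List.countP_eq_zero.mpr; intro x hmem
        have := ha x hmem; simp; omega
      have h1 : (if decide (t < a) = true then 1 else 0) = 0 := by simp; omega
      omega
    | succ j =>
      have hj' : j < s'.length := by simpa using hj
      simp only [List.getElem_cons_succ] at hx
      have hle := ih hp j hj' hx
      simp only [List.countP_cons]
      split <;> omega

lemma countP_partition (p : Int) (q : Int → Bool) (l : List Int) :
    l.countP q = l.countP (fun x => q x && decide (p < x)) + l.countP (fun x => q x && decide (x = p))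
      + l.countP (fun x => q x && decide (x < p)) := by
  induction l with
  | nil => simp
  | cons a l ih =>
    simp only [List.countP_cons, ih]
    by_cases hq : q a
    · rcases lt_trichotomy a p with h | h | h
      · simp [hq, h, lt_asymm h, ne_of_lt h]; omega
      · subst h; simp [hq]; omega
      · simp [hq, h, lt_asymm h, ne_of_gt h]; omega
    · simp [hq]

lemma countP_le_split (t : Int) (l : List Int) :
    l.countP (fun x => decide (t ≤ x)) = l.countP (fun x => decide (t < x)) + l.countP (fun x => decide (x = t)) := by
  induction l with
  | nil => simp
  | cons a l ih =>
    simp only [List.countP_cons, ih]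
    rcases lt_trichotomy t a with h | h | h
    · simp [h, le_of_lt h, (ne_of_lt h).symm]; omega
    · simp [h.symm]; omega
    · simp [not_le.mpr h, not_lt.mpr (le_of_lt h), ne_of_lt h]

lemma threshold_unique (l : List Int) (k : Int) (t1 t2 : Int)
    (h1a : k ≤ (l.countP (fun x => decide (t1 ≤ x)) : Int)) (h1b : (l.countP (fun x => decide (t1 < x)) : Int) < k)
    (h2a : k ≤ (l.countP (fun x => decide (t2 ≤ x)) : Int)) (h2b : (l.countP (fun x => decide (t2 < x)) : Int) < k) :
    t1 = t2 := by
  rcases lt_trichotomy t1 t2 with h | h | h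
  · exfalso
    have : l.countP (fun x => decide (t2 ≤ x)) ≤ l.countP (fun x => decide (t1 < x)) := by
      apply List.countP_mono_left; intro x hx; simp; omega
    omega
  · exact h
  · exfalso
    have : l.countP (fun x => decide (t1 ≤ x)) ≤ l.countP (fun x => decide (t2 < x)) := by
      apply List.countP_mono_left; intro x hx; simp; omega
    omega

lemma numPlayersGo_ge (k : Int) (t? : Option Int) :
    ∀ (rest : List Int) (i : Nat) (acc : Int), acc ≤ numPlayersGo k t? i rest acc := by
  intro rest
  induction rest with
  | nil => intro i acc; simp [numPlayersGo]
  | cons x xs ih =>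
    intro i acc
    simp only [numPlayersGo]
    split
    · exact le_trans (by omega) (ih (i + 1) (acc + 1))
    · match t? with
      | some t =>
        by_cases hx : x = t
        · simpa [hx] using le_trans (by omega) (ih (i + 1) (acc + 1))
        · simp [hx]
      | none => simp

lemma numPlayersGo_all (k : Int) (t? : Option Int) :
    ∀ (rest : List Int) (i : Nat) (acc : Int), (i : Int) + rest.length ≤ k →
      numPlayersGo k t? i rest acc = acc + rest.length := by
  intro rest
  induction rest with
  | nil => intro i acc _; simp [numPlayersGo]
  | cons x xs ih =>
    intro i acc h
    simp only [List.length_cons] at h ⊢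
    have hik : (i : Int) < k := by push_cast at h ⊢; omega
    simp only [numPlayersGo, if_pos hik]
    rw [ih (i + 1) (acc + 1) (by push_cast at h ⊢; omega)]
    push_cast; ring

lemma desc_getElem_anti (s : List Int) (hs : s.Pairwise (fun a b => b ≤ a)) :
    ∀ (p q : Nat) (hpq : p ≤ q) (hq : q < s.length), s[q] ≤ s[p]'(by omega) := by
  intro p q hpq hq
  rcases Nat.eq_or_lt_of_le hpq with rfl | hlt
  · exact le_refl _
  · exact (List.pairwise_iff_getElem.mp hs) p q (by omega) hq hlt

lemma numPlayersGo_main (s : List Int) (hs : s.Pairwise (fun a b => b ≤ a)) (k : Int) (t : Int)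
    (hk1 : 1 ≤ k) (hkn : k ≤ (s.length : Int))
    (ht : ∀ (h : (k - 1).toNat < s.length), s[(k - 1).toNat] = t) :
    ∀ (i : Nat), i ≤ s.countP (fun x => decide (t ≤ x)) →
      numPlayersGo k (some t) i (s.drop i) (i : Int) = (s.countP (fun x => decide (t ≤ x)) : Int) := by
  have hc_le : s.countP (fun x => decide (t ≤ x)) ≤ s.length := List.countP_le_length
  have hkl : (k - 1).toNat < s.length := by omega
  have htt := ht hkl
  have main : ∀ (d : Nat) (i : Nat), s.length - i ≤ d → i ≤ s.countP (fun x => decide (t ≤ x)) →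
      numPlayersGo k (some t) i (s.drop i) (i : Int) = (s.countP (fun x => decide (t ≤ x)) : Int) := by
    intro d
    induction d with
    | zero =>
      intro i hd hi
      have hlen : s.length ≤ i := by omega
      rw [List.drop_eq_nil_of_le hlen]
      simp only [numPlayersGo]
      omega
    | succ d ihd =>
      intro i hd hi
      by_cases hil : i < s.length
      · rw [List.drop_eq_getElem_cons hil]
        simp only [numPlayersGo]
        have hstep : i + 1 ≤ s.countP (fun x => decide (t ≤ x)) →
            numPlayersGo k (some t) (i + 1) (s.drop (i + 1)) ((i : Int) + 1)
              = (s.countP (fun x => decide (t ≤ x)) : Int) := by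
          intro h1
          have := ihd (i + 1) (by omega) h1
          simpa using this
        by_cases hik : (i : Int) < k
        · rw [if_pos hik]
          apply hstep
          have hle : t ≤ s[i] := by
            rw [← htt]
            exact desc_getElem_anti s hs i (k - 1).toNat (by omega) hkl
          have := (desc_le_index_iff s hs t i hil).mp hle
          omega
        · rw [if_neg hik]
          by_cases hx : s[i] = t
          · rw [if_pos hx]
            apply hstep
            have hle : t ≤ s[i] := le_of_eq hx.symm
            have := (desc_le_index_iff s hs t i hil).mp hle
            omega
          · rw [if_neg hx]
            have hge : s.countP (fun x => decide (t ≤ x)) ≤ i := by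
              by_contra hcon
              have hle : t ≤ s[i] := (desc_le_index_iff s hs t i hil).mpr (by omega)
              have hanti : s[i] ≤ s[(k - 1).toNat] := by
                apply desc_getElem_anti s hs (k - 1).toNat i (by omega) hil
              rw [htt] at hanti
              exact hx (le_antisymm hanti hle)
            omega
      · have hlen : s.length ≤ i := by omega
        rw [List.drop_eq_nil_of_le hlen]
        simp only [numPlayersGo]
        omega
  intro i hi
  exact main (s.length - i) i (le_refl _) hi

lemma length_split (p : Int) (l : List Int) :
    l.length = l.countP (fun x => decide (p < x)) + l.countP (fun x => decide (x = p))
      + l.countP (fun x => decide (x < p)) := by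
  have := countP_partition p (fun _ => true) l
  simpa using this

lemma kthLargest_spec :
    ∀ (n : Nat) (xs : List Int) (k : Int), xs.length = n → 1 ≤ k → k ≤ (xs.length : Int) →
      kthLargest xs k ∈ xs ∧
      k ≤ (xs.countP (fun x => decide (kthLargest xs k ≤ x)) : Int) ∧
      (xs.countP (fun x => decide (kthLargest xs k < x)) : Int) < k := by
  intro n
  induction n using Nat.strong_induction_on with
  | _ n ih =>
    intro xs k hlen hk1 hk2
    have hxne : xs ≠ [] := by
      intro h; rw [h] at hk2; simp at hk2; omega
    rw [kthLargest]
    rw [dif_neg hxne]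
    simp only []
    set p := xs.getD (xs.length / 2) 0 with hpdef
    have hp_mem : p ∈ xs := by
      rw [hpdef, List.getD_eq_getElem xs 0 (Nat.div_lt_self (List.length_pos_of_ne_nil hxne) (by omega))]
      exact List.getElem_mem _
    set cG := xs.countP (fun x => decide (p < x)) with hcG
    set cE := xs.countP (fun x => decide (x = p)) with hcE
    set cL := xs.countP (fun x => decide (x < p)) with hcL
    have hGlen : (xs.filter (fun x => decide (p < x))).length = cG := (List.countP_eq_length_filter).symm
    have hLlen : (xs.filter (fun x => decide (x < p))).length = cL := (List.countP_eq_length_filter).symm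
    have hsplit : xs.length = cG + cE + cL := length_split p xs
    have hE1 : 0 < cE := List.countP_pos_iff.mpr ⟨p, hp_mem, by simp⟩
    simp only [hGlen, hLlen]
    split_ifs with h1 h2
    · -- recurse into gt
      have hlt : (xs.filter (fun x => decide (p < x))).length < n := by
        rw [hGlen]; omega
      obtain ⟨hmem, ha, hb⟩ := ih _ hlt (xs.filter (fun x => decide (p < x))) k rfl hk1
        (by rw [hGlen]; exact h1)
      set t := kthLargest (xs.filter (fun x => decide (p < x))) k with hts
      have hpt : p < t := by
        have := (List.mem_filter.mp hmem).2; simpa using this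
      refine ⟨List.mem_of_mem_filter hmem, ?_, ?_⟩
      · have hsub : (xs.filter (fun x => decide (p < x))).countP (fun x => decide (t ≤ x))
            ≤ xs.countP (fun x => decide (t ≤ x)) :=
          (List.filter_sublist).countP_le
        omega
      · have heqc : (xs.filter (fun x => decide (p < x))).countP (fun x => decide (t < x))
            = xs.countP (fun x => decide (t < x)) := by
          rw [List.countP_filter]
          apply List.countP_congr
          intro a _
          by_cases h : t < a
          · simp [h]; omega
          · simp [h]
        rw [← heqc]
        exact hb
    · -- pivot is the answer
      refine ⟨hp_mem, ?_, ?_⟩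
      · rw [countP_le_split]
        push_cast at h2 ⊢
        omega
      · push_cast at h1 ⊢
        omega
    · -- recurse into less
      set k' := k - ((xs.length : Int) - (cL : Int)) with hk'
      have hltn : (xs.filter (fun x => decide (x < p))).length < n := by
        rw [hLlen]; omega
      have hk'1 : 1 ≤ k' := by push_cast at h2 ⊢; omega
      have hk'2 : k' ≤ ((xs.filter (fun x => decide (x < p))).length : Int) := by
        rw [hLlen]; omega
      obtain ⟨hmem, ha, hb⟩ := ih _ hltn (xs.filter (fun x => decide (x < p))) k' rfl hk'1 hk'2
      set t := kthLargest (xs.filter (fun x => decide (x < p))) k' with hts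
      have htp : t < p := by
        have := (List.mem_filter.mp hmem).2; simpa using this
      have hL_le : (xs.filter (fun x => decide (x < p))).countP (fun x => decide (t ≤ x))
          = xs.countP (fun x => decide (t ≤ x) && decide (x < p)) := by
        rw [List.countP_filter]
      have hL_lt : (xs.filter (fun x => decide (x < p))).countP (fun x => decide (t < x))
          = xs.countP (fun x => decide (t < x) && decide (x < p)) := by
        rw [List.countP_filter]
      have hpart_le := countP_partition p (fun x => decide (t ≤ x)) xs
      have hpart_lt := countP_partition p (fun x => decide (t < x)) xs
      have hG_le : xs.countP (fun x => decide (t ≤ x) && decide (p < x)) = cG := by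
        apply List.countP_congr; intro a _
        by_cases h : p < a
        · simp [h]; omega
        · simp [h]
      have hG_lt : xs.countP (fun x => decide (t < x) && decide (p < x)) = cG := by
        apply List.countP_congr; intro a _
        by_cases h : p < a
        · simp [h]; omega
        · simp [h]
      have hE_le : xs.countP (fun x => decide (t ≤ x) && decide (x = p)) = cE := by
        apply List.countP_congr; intro a _
        by_cases h : a = p
        · simp [h]; omega
        · simp [h]
      have hE_lt : xs.countP (fun x => decide (t < x) && decide (x = p)) = cE := by
        apply List.countP_congr; intro a _
        by_cases h : a = p
        · simp [h]; omega
        · simp [h]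
      refine ⟨List.mem_of_mem_filter hmem, ?_, ?_⟩
      · omega
      · omega

lemma foldr_count_pos (scores : List Int) :
    scores.foldr (fun x n => if 0 < x then n + 1 else n) (0 : Int)
      = (scores.countP (fun x => decide (0 < x)) : Int) := by
  induction scores with
  | nil => simp
  | cons a l ih =>
    simp only [List.foldr_cons, List.countP_cons, ih]
    by_cases h : 0 < a <;> simp [h]

lemma count_eq_countP_eq (m : Int) (l : List Int) :
    l.count m = l.countP (fun x => decide (x = m)) := by
  rw [List.count_eq_countP]
  apply List.countP_congr
  intro a _
  simp

lemma pos_facts (scores : List Int) (m : Int)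
    (hm : PySem.List.max? (scores.filter (fun s => decide (0 < s))) (fun y => y) = some m) :
    scores.foldl max 0 = m ∧
    scores.countP (fun x => decide (x = m))
      = (scores.filter (fun s => decide (0 < s))).countP (fun x => decide (x = m)) ∧
    scores.countP (fun x => decide (0 < x)) = (scores.filter (fun s => decide (0 < s))).length := by
  have hmm : m ∈ scores.filter (fun s => decide (0 < s)) := PySem.List.max?_mem hm
  have hmax : ∀ y ∈ scores.filter (fun s => decide (0 < s)), y ≤ m :=
    fun y hy => PySem.List.max?_isMax hm y hy
  have hm_pos : 0 < m := by have := (List.mem_filter.mp hmm).2; simpa using this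
  have hm_scores : m ∈ scores := (List.mem_filter.mp hmm).1
  have hfold := PySem.List.le_foldl_max scores 0
  have hm_le_M : m ≤ scores.foldl max 0 := hfold.2 m hm_scores
  refine ⟨?_, ?_, ?_⟩
  · rcases PySem.List.foldl_max_mem scores 0 with h0 | hmem
    · have h0' : scores.foldl max 0 = 0 := h0
      omega
    · have hMmem : scores.foldl max 0 ∈ scores := hmem
      have hMpos : (0 : Int) < scores.foldl max 0 := by omega
      have hMfil : scores.foldl max 0 ∈ scores.filter (fun s => decide (0 < s)) :=
        List.mem_filter.mpr ⟨hMmem, by simpa using hMpos⟩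
      have hle : scores.foldl max 0 ≤ m := hmax _ hMfil
      omega
  · rw [List.countP_filter]
    apply List.countP_congr
    intro a _
    by_cases h : a = m
    · subst h; simp; omega
    · simp [h]
  · exact List.countP_eq_length_filter

-- shared facts about sorted(pos, reverse=True)
lemma sorted_facts (pos : List Int) :
    (PySem.List.sorted pos (fun x => x) true).Pairwise (fun a b => b ≤ a) ∧
    (PySem.List.sorted pos (fun x => x) true).Perm pos := by
  constructor
  · simpa using PySem.List.sorted_pairwise_rev pos (fun x => x)
  · exact PySem.List.sorted_perm pos (fun x => x) true

theorem numPlayers_spec : Claim_unchanged_numPlayers := by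
  unfold Claim_unchanged_numPlayers
  intro k scores _ hpre hnD
  show numPlayers k scores = numPlayers_alt k scores
  rw [numPlayers, numPlayers_alt]
  obtain ⟨hpair, hperm⟩ := sorted_facts (scores.filter (fun s => decide (0 < s)))
  set pos := scores.filter (fun s => decide (0 < s)) with hposdef
  set S := PySem.List.sorted pos (fun x => x) true with hSdef
  have hlenS : S.length = pos.length := hperm.length_eq
  unfold Pre_numPlayers at hpre
  rw [← hposdef] at hpre
  clear_value S pos
  by_cases hk0 : k ≤ 0
  · rw [if_pos hk0]
    by_cases hnil : pos = []
    · have : S = [] := by rw [hSdef, hnil]; exact (PySem.List.sorted_eq_nil_iff [] (fun x => x) true).mpr rfl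
      rw [this]
      simp [numPlayersGo]
    · have h1k : 1 - k ≤ (pos.length : Int) := by
        rcases hpre with h | h | h
        · omega
        · exact absurd h hnil
        · exact h
      -- the wrapped index j
      have hkn1 : 1 ≤ (1 - k).toNat := by omega
      have hknle : (1 - k).toNat ≤ S.length := by omega
      have hj : S.length - (1 - k).toNat < S.length := by omega
      have hget : PySem.List.pyGet? S (k - 1) = some (S[S.length - (1 - k).toNat]'hj) := by
        have : k - 1 = -(((1 - k).toNat : Int)) := by omega
        rw [this, PySem.List.pyGet?_neg_natCast S ((1 - k).toNat) (by omega) hknle]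
        exact List.getElem?_eq_getElem hj
      -- the maximum m of pos
      obtain ⟨m, hm⟩ : ∃ m, PySem.List.max? pos (fun y => y) = some m := by
        cases hmm : PySem.List.max? pos (fun y => y) with
        | none => exact absurd ((PySem.List.max?_eq_none_iff pos (fun y => y)).mp hmm) hnil
        | some m => exact ⟨m, rfl⟩
      have hmmax : ∀ y ∈ pos, y ≤ m := fun y hy => PySem.List.max?_isMax hm y hy
      have hmmem : m ∈ pos := PySem.List.max?_mem hm
      have hcongr : pos.countP (fun x => decide (x = m)) = pos.countP (fun x => decide (m ≤ x)) := by
        apply List.countP_congr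
        intro a hamem
        have := hmmax a hamem
        by_cases h : a = m
        · simp [h]
        · have : ¬ (m ≤ a) := by omega
          simp [h, this]
      -- ¬D gives: the count of the maximum does not reach past index j
      have hmf : PySem.List.max? (scores.filter (fun s => decide (0 < s))) (fun y => y) = some m := by
        rw [← hposdef]; exact hm
      obtain ⟨hfold, hcntEq, hcLen⟩ := pos_facts scores m hmf
      rw [← hposdef] at hcntEq hcLen
      have hcnt : (pos.countP (fun x => decide (m ≤ x)) : Int) ≤ (pos.length : Int) + k - 1 := by
        have h4 : ¬ ((pos.length : Int) + k - 1 < (pos.countP (fun x => decide (x = m)) : Int)) := by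
          intro hlt
          apply hnD
          unfold D_numPlayers
          rw [hfold, foldr_count_pos, count_eq_countP_eq, hcntEq, hcLen]
          exact ⟨hk0, by omega, by omega⟩
        omega
      have hjval : ((S.length - (1 - k).toNat : Nat) : Int) = (pos.length : Int) + k - 1 := by
        omega
      -- S[j] < m
      have hSj_lt : S[S.length - (1 - k).toNat]'hj < m := by
        by_contra hcon
        have hle : m ≤ S[S.length - (1 - k).toNat]'hj := by omega
        have := (desc_le_index_iff S hpair m _ hj).mp hle
        rw [hperm.countP_eq] at this
        omega
      -- S is nonempty with a head ≥ m
      have hSne : S ≠ [] := by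
        intro hcon
        have : PySem.List.sorted pos (fun x => x) true = [] := by rw [← hSdef]; exact hcon
        exact hnil ((PySem.List.sorted_eq_nil_iff pos (fun x => x) true).mp this)
      obtain ⟨a, tl, hcons⟩ := List.exists_cons_of_ne_nil hSne
      have hma : m ≤ a := by
        have h0 : (0 : Nat) < S.length := by omega
        have hpos0 : 0 < S.countP (fun x => decide (m ≤ x)) := by
          rw [hperm.countP_eq]
          exact List.countP_pos_iff.mpr ⟨m, hmmem, by simp⟩
        have hle := (desc_le_index_iff S hpair m 0 h0).mpr (by omega)
        have ha0 : S[0]'h0 = a := by simp [hcons]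
        omega
      have hane : a ≠ S[S.length - (1 - k).toNat]'hj := by omega
      rw [hget]
      generalize hgen : S[S.length - (1 - k).toNat]'hj = v at hane
      rw [hcons]
      simp only [numPlayersGo]
      rw [if_neg (by omega), if_neg hane]
  · rw [if_neg hk0]
    have hk1 : 1 ≤ k := by omega
    by_cases hbig : (pos.length : Int) ≤ k
    · rw [if_pos hbig]
      have := numPlayersGo_all k (PySem.List.pyGet? S (k - 1)) S 0 0 (by push_cast; omega)
      simpa [hlenS] using this
    · rw [if_neg hbig]
      have hklen : k < (pos.length : Int) := by omega
      have hkn1 : (k - 1).toNat < S.length := by omega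
      have hget : PySem.List.pyGet? S (k - 1) = some (S[(k - 1).toNat]'hkn1) :=
        PySem.List.pyGet?_eq_some_getElem S (i := k - 1) (by omega) (by omega)
      set t := S[(k - 1).toNat]'hkn1 with htdef
      have hA : numPlayersGo k (PySem.List.pyGet? S (k - 1)) 0 S 0
          = (S.countP (fun x => decide (t ≤ x)) : Int) := by
        rw [hget]
        have := numPlayersGo_main S hpair k t hk1 (by omega) (fun _ => rfl) 0 (by omega)
        simpa using this
      rw [hA]
      -- count properties of t over pos
      have hta : k ≤ (pos.countP (fun x => decide (t ≤ x)) : Int) := by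
        have := (desc_le_index_iff S hpair t (k - 1).toNat hkn1).mp (le_refl t)
        rw [hperm.countP_eq] at this
        omega
      have htb : (pos.countP (fun x => decide (t < x)) : Int) < k := by
        have := desc_countP_lt_le S hpair t (k - 1).toNat hkn1 (le_refl _)
        rw [hperm.countP_eq] at this
        omega
      obtain ⟨_, hqa, hqb⟩ := kthLargest_spec pos.length pos k rfl hk1 (le_of_lt hklen)
      have := threshold_unique pos k t (kthLargest pos k) hta htb hqa hqb
      rw [hperm.countP_eq, this]

theorem numPlayers_changed : Claim_changed_numPlayers := by
  unfold Claim_changed_numPlayers; decide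

theorem numPlayers_tight : Claim_exact_numPlayers := by
  unfold Claim_exact_numPlayers
  intro k scores _ _ hD
  obtain ⟨hk0, h1kc, hcntS⟩ := hD
  rw [foldr_count_pos] at h1kc hcntS
  obtain ⟨hpair, hperm⟩ := sorted_facts (scores.filter (fun s => decide (0 < s)))
  rw [numPlayers, numPlayers_alt]
  set pos := scores.filter (fun s => decide (0 < s)) with hposdef
  set S := PySem.List.sorted pos (fun x => x) true with hSdef
  have hlenS : S.length = pos.length := hperm.length_eq
  clear_value S pos
  rw [if_pos hk0]
  have hcLen0 : scores.countP (fun x => decide (0 < x)) = pos.length := by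
    rw [hposdef]; exact List.countP_eq_length_filter
  have hnil : pos ≠ [] := by
    have : 0 < pos.length := by omega
    exact List.ne_nil_of_length_pos this
  obtain ⟨m, hm⟩ : ∃ m, PySem.List.max? pos (fun y => y) = some m := by
    cases hmm : PySem.List.max? pos (fun y => y) with
    | none => exact absurd ((PySem.List.max?_eq_none_iff pos (fun y => y)).mp hmm) hnil
    | some m => exact ⟨m, rfl⟩
  have hmf : PySem.List.max? (scores.filter (fun s => decide (0 < s))) (fun y => y) = some m := by
    rw [← hposdef]; exact hm
  obtain ⟨hfold, hcntEq, hcLen⟩ := pos_facts scores m hmf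
  rw [← hposdef] at hcntEq hcLen
  have h1k : 1 - k ≤ (pos.length : Int) := by omega
  rw [hfold] at hcntS
  rw [count_eq_countP_eq, hcntEq] at hcntS
  have hcnt : (pos.length : Int) + k - 1 < (pos.countP (fun x => decide (x = m)) : Int) := by
    omega
  have hmmax : ∀ y ∈ pos, y ≤ m := fun y hy => PySem.List.max?_isMax hm y hy
  have hmmem : m ∈ pos := PySem.List.max?_mem hm
  have hcongr : pos.countP (fun x => decide (x = m)) = pos.countP (fun x => decide (m ≤ x)) := by
    apply List.countP_congr
    intro a hamem
    have := hmmax a hamem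
    by_cases h : a = m
    · simp [h]
    · have : ¬ (m ≤ a) := by omega
      simp [h, this]
  have hcnt2 : (pos.length : Int) + k - 1 < (pos.countP (fun x => decide (m ≤ x)) : Int) := by
    rw [← hcongr]; exact hcnt
  have hkn1 : 1 ≤ (1 - k).toNat := by omega
  have hknle : (1 - k).toNat ≤ S.length := by omega
  have hj : S.length - (1 - k).toNat < S.length := by omega
  have hget : PySem.List.pyGet? S (k - 1) = some (S[S.length - (1 - k).toNat]'hj) := by
    have : k - 1 = -(((1 - k).toNat : Int)) := by omega
    rw [this, PySem.List.pyGet?_neg_natCast S ((1 - k).toNat) (by omega) hknle]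
    exact List.getElem?_eq_getElem hj
  -- here the wrapped element IS the maximum, so the first loop step counts
  have hSj_eq : S[S.length - (1 - k).toNat]'hj = m := by
    have hjc : ((S.length - (1 - k).toNat : Nat) : Int) = (pos.length : Int) + k - 1 := by omega
    have hle : m ≤ S[S.length - (1 - k).toNat]'hj := by
      apply (desc_le_index_iff S hpair m _ hj).mpr
      rw [hperm.countP_eq]
      omega
    have hge : S[S.length - (1 - k).toNat]'hj ≤ m :=
      hmmax _ (hperm.mem_iff.mp (List.getElem_mem hj))
    omega
  have hSne : S ≠ [] := by
    intro hcon
    have : PySem.List.sorted pos (fun x => x) true = [] := by rw [← hSdef]; exact hcon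
    exact hnil ((PySem.List.sorted_eq_nil_iff pos (fun x => x) true).mp this)
  obtain ⟨a, tl, hcons⟩ := List.exists_cons_of_ne_nil hSne
  have ha_eq : a = m := by
    have h0 : (0 : Nat) < S.length := by omega
    have hpos0 : 0 < S.countP (fun x => decide (m ≤ x)) := by
      rw [hperm.countP_eq]
      exact List.countP_pos_iff.mpr ⟨m, hmmem, by simp⟩
    have hle := (desc_le_index_iff S hpair m 0 h0).mpr (by omega)
    have hge : S[0]'h0 ≤ m := hmmax _ (hperm.mem_iff.mp (List.getElem_mem h0))
    have ha0 : S[0]'h0 = a := by simp [hcons]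
    omega
  rw [hget]
  generalize hgen : S[S.length - (1 - k).toNat]'hj = v at hSj_eq
  rw [hcons]
  simp only [numPlayersGo]
  rw [if_neg (by omega : ¬ ((0 : Nat) : Int) < k), if_pos (by rw [ha_eq, hSj_eq])]
  have := numPlayersGo_ge k (some v) tl (0 + 1) (0 + 1)
  omega
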